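-- pv_equiv track=rewrite | github.com/aloshdenny/superfloat | src/test/convert_to_stream.py | extract_diagonals
-- ===== SOURCE A (Python) =====
-- def extract_diagonals(matrix, hex_digits=4):
--     """
--     Extract diagonals from n×n matrix and pad with zeros.
--     Diagonals go from top-right to bottom-left.
--
--     Args:
--         matrix: n×n matrix of integer values
--         hex_digits: number of hex digits per element (default 4 for 16-bit values)
--
--     Returns:
--         list of diagonals, each padded to length n
--     """
--     n = len(matrix)
--     diagonals = []
--     padding_str = "0" * hex_digits
--
--     # Total number of diagonals in an n×n matrix is (2n-1)
--     for d in range(2 * n - 1):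
--         diagonal = []
--
--         # For each diagonal, find all elements that belong to it
--         for i in range(n):
--             j = d - i
--             if 0 <= j < n:
--                 # Convert to hex string with proper padding
--                 val = format(matrix[i][j], f'0{hex_digits}X')
--                 diagonal.append(val)
--
--         # Pad with zeros to make length n
--         # Diagonals 0 to n-1: pad on the left
--         # Diagonals n to 2n-2: pad on the right
--         padding_needed = n - len(diagonal)
--         if d < n:
--             padded_diagonal = [padding_str] * padding_needed + diagonal
--         else:
--             padded_diagonal = diagonal + [padding_str] * padding_needed
--
--         diagonals.append(padded_diagonal)
--
--     return diagonals
-- ===== SOURCE B (Python) =====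
-- def extract_diagonals(matrix, hex_digits=4):
--     """Single-sweep rewrite: bucket every element into its diagonal in one
--     pass over the matrix, then pad each bucket."""
--     n = len(matrix)
--     padding_str = "0" * hex_digits
--     buckets = [[] for _ in range(2 * n - 1)]
--     for i, row in enumerate(matrix):
--         for j in range(n):
--             buckets[i + j].append(format(row[j], f'0{hex_digits}X'))
--     result = []
--     for d in range(2 * n - 1):
--         diagonal = buckets[d]
--         pad = [padding_str] * (n - len(diagonal))
--         result.append(pad + diagonal if d < n else diagonal + pad)
--     return result
-- ===== Notes on version B (the rewrite author's own statement) =====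
-- stated objective: alternative
-- what changed: B makes one sweep over the matrix, bucketing each element into diagonal list i+j, instead of A's per-diagonal rescan of all n rows for each of the 2n-1 diagonals; a second pass only pads the buckets.
import Mathlib
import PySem

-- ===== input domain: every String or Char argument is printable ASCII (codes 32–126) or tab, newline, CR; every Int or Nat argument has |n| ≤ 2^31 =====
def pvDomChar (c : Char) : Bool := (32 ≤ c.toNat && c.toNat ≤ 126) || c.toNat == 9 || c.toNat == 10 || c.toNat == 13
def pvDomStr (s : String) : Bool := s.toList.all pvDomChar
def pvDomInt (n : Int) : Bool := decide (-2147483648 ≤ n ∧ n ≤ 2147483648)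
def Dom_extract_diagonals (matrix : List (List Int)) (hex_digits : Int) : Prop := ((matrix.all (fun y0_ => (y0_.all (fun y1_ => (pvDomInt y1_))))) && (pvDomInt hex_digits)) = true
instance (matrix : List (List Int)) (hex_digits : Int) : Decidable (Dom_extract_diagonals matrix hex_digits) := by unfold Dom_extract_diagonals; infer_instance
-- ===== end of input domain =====

-- B buckets every element into its diagonal (index i+j) in ONE sweep over the matrix
-- instead of rescanning every row for each of the 2n-1 diagonals, then pads each bucket.

-- shared helper used identically by both ports: Python's format(v, f'0{k}X') —
-- uppercase hex of |v|, sign first, zero-filled between sign and digits up to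
-- total width k (exact for 0 ≤ k, which Pre_ guarantees)
def fmtHex (v : Int) (k : Int) : String :=
  let digits := (Nat.toDigits 16 v.natAbs).map Char.toUpper
  let sign : List Char := if v < 0 then ['-'] else []
  String.ofList (sign ++ List.replicate (k.toNat - (digits.length + sign.length)) '0' ++ digits)

-- ===== PORT A =====
def extract_diagonals (matrix : List (List Int)) (hex_digits : Int) : List (List String) :=
  let n : Int := (matrix.length : Int)
  let padding_str : String := String.ofList (List.replicate hex_digits.toNat '0')
  (PySem.List.pyRange 0 (2 * n - 1) 1).foldl
    (fun diagonals d =>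
      let diagonal : List String :=
        (PySem.List.pyRange 0 n 1).foldl
          (fun diagonal i =>
            let j := d - i
            if 0 ≤ j ∧ j < n then
              diagonal ++ [fmtHex (PySem.List.pyGetD (PySem.List.pyGetD matrix i []) j 0) hex_digits]
            else diagonal) []
      let padding_needed : Int := n - (diagonal.length : Int)
      let padded_diagonal :=
        if d < n then List.replicate padding_needed.toNat padding_str ++ diagonal
        else diagonal ++ List.replicate padding_needed.toNat padding_str
      diagonals ++ [padded_diagonal]) []

-- ===== PORT B =====
def extract_diagonals_alt (matrix : List (List Int)) (hex_digits : Int) : List (List String) :=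
  let n : Nat := matrix.length
  let padding_str : String := String.ofList (List.replicate hex_digits.toNat '0')
  let buckets : List (List String) :=
    matrix.zipIdx.foldl
      (fun b p =>
        (List.range n).foldl
          (fun b j =>
            b.set (p.2 + j) ((b.getD (p.2 + j) []) ++ [fmtHex (PySem.List.pyGetD p.1 (j : Int) 0) hex_digits]))
          b)
      (List.replicate (2 * n - 1) [])
  (List.range (2 * n - 1)).foldl
    (fun result d =>
      let diagonal := buckets.getD d []
      let pad := List.replicate (n - diagonal.length) padding_str
      result ++ [if d < n then pad ++ diagonal else diagonal ++ pad]) []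

-- ===== PRECONDITION & SPEC =====
-- A raises exactly when the matrix is non-empty and either hex_digits < 0 (ValueError:
-- invalid format spec) or some row is shorter than len(matrix) (IndexError); Pre_
-- excludes exactly those inputs (the Python B raises there too).
def Pre_extract_diagonals (matrix : List (List Int)) (hex_digits : Int) : Prop :=
  matrix = [] ∨ (0 ≤ hex_digits ∧ ∀ row ∈ matrix, matrix.length ≤ row.length)
instance (matrix : List (List Int)) (hex_digits : Int) : Decidable (Pre_extract_diagonals matrix hex_digits) := by unfold Pre_extract_diagonals; infer_instance

def pvWitness_extract_diagonals : List (List Int) × Int := ([[1, 2], [3, 4]], 4)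

def Spec_extract_diagonals (matrix : List (List Int)) (hex_digits : Int) (out : List (List String)) : Prop := out = extract_diagonals_alt matrix hex_digits
instance (matrix : List (List Int)) (hex_digits : Int) (out : List (List String)) : Decidable (Spec_extract_diagonals matrix hex_digits out) := by unfold Spec_extract_diagonals; infer_instance

-- ===== CLAIM (what is proved, stated in full; the proofs are below) =====
def Claim_equal_extract_diagonals : Prop := ∀ (matrix : List (List Int)) (hex_digits : Int), Dom_extract_diagonals matrix hex_digits → Pre_extract_diagonals matrix hex_digits → Spec_extract_diagonals matrix hex_digits (extract_diagonals matrix hex_digits)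

-- ===== LEMMAS AND PROOFS =====

-- the element of diagonal d contributed by row i (j = column), as both ports reach it
def pvF (matrix : List (List Int)) (hd : Int) (i j : Nat) : String :=
  fmtHex (PySem.List.pyGetD (matrix.getD i []) (j : Int) 0) hd

-- the (unpadded) diagonal d: the closed form both ports are reduced to
def pvDiagSpec (matrix : List (List Int)) (hd : Int) (n d : Nat) : List String :=
  (List.range n).flatMap (fun i => if i ≤ d ∧ d < i + n then [pvF matrix hd i (d - i)] else [])

-- the padded diagonal d
def pvPad (matrix : List (List Int)) (hd : Int) (n d : Nat) : List String :=
  let diag := pvDiagSpec matrix hd n d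
  let pad := List.replicate (n - diag.length) (String.ofList (List.replicate hd.toNat '0'))
  if d < n then pad ++ diag else diag ++ pad

-- B's inner loop (one row) preserves the bucket-list length
lemma b_row_length (hd : Int) (n : Nat) (row : List Int) (i : Nat) (b : List (List String)) :
    ((List.range n).foldl
        (fun b j => b.set (i + j) ((b.getD (i + j) []) ++ [fmtHex (PySem.List.pyGetD row (j : Int) 0) hd])) b).length
      = b.length := by
  induction n with
  | zero => simp
  | succ m ih =>
    rw [List.range_succ, List.foldl_append]
    simp only [List.foldl_cons, List.foldl_nil, List.length_set]
    exact ih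

-- B's inner loop appends row i's contribution (column d-i) to bucket d and nothing else
lemma b_row_getD (hd : Int) (n : Nat) (row : List Int) (i : Nat) (b : List (List String))
    (h : i + n ≤ b.length) (d : Nat) :
    ((List.range n).foldl
        (fun b j => b.set (i + j) ((b.getD (i + j) []) ++ [fmtHex (PySem.List.pyGetD row (j : Int) 0) hd])) b).getD d []
      = b.getD d [] ++ (if i ≤ d ∧ d < i + n then [fmtHex (PySem.List.pyGetD row ((d - i : Nat) : Int) 0) hd] else []) := by
  induction n with
  | zero =>
    rw [if_neg (by omega)]
    simp
  | succ m ih =>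
    rw [List.range_succ, List.foldl_append]
    have hlen := b_row_length hd m row i b
    simp only [List.foldl_cons, List.foldl_nil]
    rw [List.getD_eq_getElem?_getD, List.getElem?_set]
    by_cases hdm : i + m = d
    · subst hdm
      rw [if_pos rfl, if_pos (by omega)]
      rw [ih (by omega)]
      have hne : ¬ (i ≤ i + m ∧ i + m < i + m) := by omega
      rw [if_neg hne, if_pos (by omega)]
      have h2 : (i + m - i : Nat) = m := by omega
      simp [h2]
    · rw [if_neg hdm, ← List.getD_eq_getElem?_getD, ih (by omega)]
      by_cases hc : i ≤ d ∧ d < i + m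
      · rw [if_pos hc, if_pos (by omega)]
      · rw [if_neg hc, if_neg (by omega)]

-- B's bucket fold, characterised row by row
lemma b_buckets_getD (matrix : List (List Int)) (hd : Int) (n : Nat) (d : Nat) :
    ∀ (rows : List (List Int)) (i0 : Nat) (b : List (List String)),
      b.length = 2 * n - 1 → i0 + rows.length ≤ n →
      (∀ t, t < rows.length → rows.getD t [] = matrix.getD (i0 + t) []) →
      ((rows.zipIdx i0).foldl
          (fun b p =>
            (List.range n).foldl
              (fun b j => b.set (p.2 + j) ((b.getD (p.2 + j) []) ++ [fmtHex (PySem.List.pyGetD p.1 (j : Int) 0) hd])) b)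
          b).getD d []
        = b.getD d [] ++ (List.range rows.length).flatMap
            (fun t => if i0 + t ≤ d ∧ d < i0 + t + n then [pvF matrix hd (i0 + t) (d - (i0 + t))] else []) := by
  intro rows
  induction rows with
  | nil => intro i0 b _ _ _; simp
  | cons r rs ih =>
    intro i0 b hb hlen hrows
    rw [List.zipIdx_cons, List.foldl_cons]
    have hb' := b_row_length hd n r i0 b
    rw [ih (i0 + 1) _ (by rw [hb']; exact hb) (by simp only [List.length_cons] at hlen; omega)
        (fun t ht => by
          have := hrows (t + 1) (by simpa using ht)
          simpa [Nat.add_assoc, Nat.add_comm 1 t] using this)]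
    rw [b_row_getD hd n r i0 b (by simp only [List.length_cons] at hlen; omega) d]
    have hr0 : r = matrix.getD i0 [] := by simpa using hrows 0 (by simp)
    simp only [List.length_cons]
    rw [List.range_succ_eq_map, List.flatMap_cons, List.flatMap_map, List.append_assoc]
    congr 2
    · subst hr0
      simp [pvF]
    · congr 1
      funext t
      have h1 : i0 + (t + 1) = i0 + 1 + t := by omega
      simp only [Nat.succ_eq_add_one, h1]

-- A's inner loop over i computes the closed-form diagonal
lemma a_inner (matrix : List (List Int)) (hd : Int) (d : Nat) :
    (PySem.List.pyRange 0 (matrix.length : Int) 1).foldl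
      (fun diagonal i =>
        let j := (d : Int) - i
        if 0 ≤ j ∧ j < (matrix.length : Int) then
          diagonal ++ [fmtHex (PySem.List.pyGetD (PySem.List.pyGetD matrix i []) j 0) hd]
        else diagonal) []
      = pvDiagSpec matrix hd matrix.length d := by
  rw [PySem.List.pyRange_zero_natCast, List.foldl_map]
  rw [PySem.List.foldl_congr_mem _ _
      (fun acc i => acc ++ (if i ≤ d ∧ d < i + matrix.length then [pvF matrix hd i (d - i)] else [])) []
      (by
        intro acc x _
        simp only []
        by_cases hc : x ≤ d ∧ d < x + matrix.length
        · rw [if_pos (by constructor <;> omega), if_pos hc]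
          have hcast : (d : Int) - (x : Int) = ((d - x : Nat) : Int) := by omega
          simp [hcast, pvF, PySem.List.pyGetD_natCast]
        · rw [if_neg (by omega), if_neg hc]
          simp)]
  rw [PySem.List.foldl_append_eq_flatMap]
  simp [pvDiagSpec]

-- A equals the list of padded closed-form diagonals
lemma a_eq (matrix : List (List Int)) (hd : Int) :
    extract_diagonals matrix hd
      = (List.range (2 * matrix.length - 1)).map (pvPad matrix hd matrix.length) := by
  rcases matrix with _ | ⟨r, rs⟩
  · simp [extract_diagonals]
  · generalize hM : r :: rs = matrix
    have hn : 1 ≤ matrix.length := by rw [← hM]; simp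
    unfold extract_diagonals
    simp only []
    rw [PySem.List.foldl_congr_mem _ _ (fun acc dI => acc ++ [pvPad matrix hd matrix.length dI.toNat]) []
        (by
          intro acc dI hmem
          obtain ⟨hlo, _⟩ := PySem.List.mem_pyRange_one.mp hmem
          obtain ⟨d, rfl⟩ : ∃ k : Nat, dI = (k : Int) := ⟨dI.toNat, by omega⟩
          simp only []
          rw [a_inner matrix hd d]
          have htn : (((matrix.length : Nat) : Int) - ((pvDiagSpec matrix hd matrix.length d).length : Int)).toNat
              = matrix.length - (pvDiagSpec matrix hd matrix.length d).length :=
            Int.toNat_sub _ _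
          rw [htn]
          have hlt : ((d : Int) < ((matrix.length : Nat) : Int)) ↔ d < matrix.length := by
            exact_mod_cast Iff.rfl
          simp only [pvPad, Int.toNat_natCast]
          split_ifs with h1 h2 h2
          · rfl
          · exact absurd (hlt.mp h1) h2
          · exact absurd (hlt.mpr h2) h1
          · rfl),
        PySem.List.foldl_append_singleton_eq_map]
    have hcast : 2 * ((matrix.length : Nat) : Int) - 1 = ((2 * matrix.length - 1 : Nat) : Int) := by
      omega
    rw [hcast, PySem.List.pyRange_zero_natCast, List.map_map]
    simp

-- B's finished buckets hold exactly the closed-form diagonals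
lemma b_buckets (matrix : List (List Int)) (hd : Int) (d : Nat) :
    ((matrix.zipIdx.foldl
        (fun b p =>
          (List.range matrix.length).foldl
            (fun b j => b.set (p.2 + j) ((b.getD (p.2 + j) []) ++ [fmtHex (PySem.List.pyGetD p.1 (j : Int) 0) hd])) b)
        (List.replicate (2 * matrix.length - 1) []))).getD d []
      = pvDiagSpec matrix hd matrix.length d := by
  have h := b_buckets_getD matrix hd matrix.length d matrix 0
      (List.replicate (2 * matrix.length - 1) []) (by simp) (by omega)
      (fun t ht => by simp)
  rw [h]
  simp [pvDiagSpec]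

-- B equals the list of padded closed-form diagonals
lemma b_eq (matrix : List (List Int)) (hd : Int) :
    extract_diagonals_alt matrix hd
      = (List.range (2 * matrix.length - 1)).map (pvPad matrix hd matrix.length) := by
  unfold extract_diagonals_alt
  simp only []
  rw [PySem.List.foldl_congr_mem _ _ (fun acc d => acc ++ [pvPad matrix hd matrix.length d]) []
      (by
        intro acc d _
        simp only []
        rw [b_buckets matrix hd d]
        rfl),
      PySem.List.foldl_append_singleton_eq_map]
  simp

-- ===== VERDICT (by name: the statement is the Claim_ definition above) =====
theorem extract_diagonals_spec : Claim_equal_extract_diagonals := by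
  intro matrix hex_digits _ _
  unfold Spec_extract_diagonals
  rw [a_eq, b_eq]
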